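-- pv_equiv track=rewrite | github.com/CSchoel/codaco | codaco/fwf.py | tableness
-- ===== SOURCE A (Python) =====
-- def tableness(text: str):
--     """
--     Calculates a "tableness" score for a string by counting
--     the number of edges (indices where a space is followed
--     by a non-space or vice versa) that continue into the
--     next line.
--
--     This is a helper function for guess_tabwidth.
--     """
--     lastedges = set()
--     score = 0
--     for l in text.splitlines():
--         # count number of edges that continue from last line
--         edges = {i for i in range(len(l)-1) if l[i].isspace() ^ l[i+1].isspace()}
--         score += len(lastedges.intersection(edges))
--         lastedges = edges
--     return score
-- ===== SOURCE B (Python) =====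
-- def tableness(text: str):
--     """
--     Tableness score: number of space/non-space edges shared by
--     consecutive lines.  Set-free recursive formulation: the shared-edge
--     count of two lines is found by a direct columnwise scan over the
--     overlap of the two lines, and the total is accumulated by recursion
--     on the list of lines.
--     """
--     def shared(a, b):
--         n = min(len(a), len(b)) - 1
--         return sum(1 for i in range(n)
--                    if (a[i].isspace() != a[i + 1].isspace())
--                    and (b[i].isspace() != b[i + 1].isspace()))
--
--     def go(lines):
--         if len(lines) < 2:
--             return 0
--         return shared(lines[0], lines[1]) + go(lines[1:])
--
--     return go(text.splitlines())
-- ===== Notes on version B (the rewrite author's own statement) =====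
-- stated objective: alternative
-- what changed: Eliminates the set data structure entirely: instead of building per-line edge index sets and intersecting them in a stateful fold, B counts shared edges by a direct columnwise scan over the overlap of each adjacent pair of lines, accumulated by recursion on the line list.
import Mathlib
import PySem

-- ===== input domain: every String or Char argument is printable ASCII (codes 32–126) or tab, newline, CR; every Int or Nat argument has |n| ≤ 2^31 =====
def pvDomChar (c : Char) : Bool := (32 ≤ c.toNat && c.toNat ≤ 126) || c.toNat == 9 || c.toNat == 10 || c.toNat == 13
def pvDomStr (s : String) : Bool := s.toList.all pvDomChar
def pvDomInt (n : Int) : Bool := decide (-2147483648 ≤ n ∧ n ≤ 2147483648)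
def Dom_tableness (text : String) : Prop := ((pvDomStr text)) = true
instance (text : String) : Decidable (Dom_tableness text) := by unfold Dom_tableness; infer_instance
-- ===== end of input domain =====

-- B removes the set data structure: shared edges of each adjacent line pair are counted
-- by a direct columnwise scan over the pair's overlap, accumulated by recursion on the
-- line list (alternative decomposition, same asymptotic cost).


-- ===== PORT A =====
-- edges = {i for i in range(len(l)-1) if l[i].isspace() ^ l[i+1].isspace()}
def pvEdges (l : String) : PySem.Set Int :=
  PySem.Set.ofList ((PySem.List.pyRange 0 (PySem.Str.len l - 1) 1).filter
    (fun i => PySem.Chars.isspace (PySem.List.pyGetD l.toList i ' ')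
           ^^ PySem.Chars.isspace (PySem.List.pyGetD l.toList (i + 1) ' ')))

def tableness (text : String) : Int :=
  ((PySem.Str.splitlines text).foldl
    (fun st l =>
      let edges := pvEdges l
      (edges, st.2 + PySem.Set.len (PySem.Set.inter st.1 edges)))
    ((PySem.Set.empty : PySem.Set Int), (0 : Int))).2

-- ===== PORT B =====
-- a[i].isspace() != a[i+1].isspace()
def pvEdgeAtB (l : String) (i : Int) : Bool :=
  PySem.Chars.isspace (PySem.List.pyGetD l.toList i ' ')
    != PySem.Chars.isspace (PySem.List.pyGetD l.toList (i + 1) ' ')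

-- shared(a, b) = sum(1 for i in range(min(len(a), len(b)) - 1) if edge(a,i) and edge(b,i))
def pvShared (a b : String) : Int :=
  let n := min (PySem.Str.len a) (PySem.Str.len b) - 1
  (((PySem.List.pyRange 0 n 1).filter
      (fun i => pvEdgeAtB a i && pvEdgeAtB b i)).map (fun _ => (1 : Int))).sum

-- go(lines) = 0 if fewer than two lines, else shared(lines[0], lines[1]) + go(lines[1:])
def pvGo : List String → Int
  | [] => 0
  | [_] => 0
  | a :: b :: rest => pvShared a b + pvGo (b :: rest)

def tableness_alt (text : String) : Int :=
  pvGo (PySem.Str.splitlines text)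

-- ===== PRECONDITION & SPEC =====
def Spec_tableness (text : String) (out : Int) : Prop := out = tableness_alt text
instance (text : String) (out : Int) : Decidable (Spec_tableness text out) := by unfold Spec_tableness; infer_instance

-- ===== CLAIM (what is proved, stated in full; the proofs are below) =====
def Claim_equal_tableness : Prop := ∀ (text : String), Dom_tableness text → Spec_tableness text (tableness text)

-- ===== LEMMAS AND PROOFS =====

/-- A's running score decomposed: score of adjacent-pair intersections with previous profile `e`. -/
def pvPairScore (e : PySem.Set Int) : List String → Int
  | [] => 0
  | l :: ls => PySem.Set.len (PySem.Set.inter e (pvEdges l)) + pvPairScore (pvEdges l) ls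

theorem pvA_loop (ls : List String) (e : PySem.Set Int) (s : Int) :
    (ls.foldl (fun st l =>
      let edges := pvEdges l
      (edges, st.2 + PySem.Set.len (PySem.Set.inter st.1 edges))) (e, s)).2
      = s + pvPairScore e ls := by
  induction ls generalizing e s with
  | nil => simp [pvPairScore]
  | cons l ls ih =>
      simp only [List.foldl_cons, pvPairScore]
      exact (ih _ _).trans (add_assoc _ _ _)

/-- Per-pair core: the size of the intersection of two lines' edge sets equals B's
    columnwise count over the pair's overlap. -/
theorem pvPair (a b : String) :
    PySem.Set.len (PySem.Set.inter (pvEdges a) (pvEdges b)) = pvShared a b := by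
  unfold pvEdges pvShared
  rw [PySem.Set.ofList_eq_self_of_nodup _ ((PySem.List.nodup_pyRange_one _ _).filter _),
      PySem.Set.ofList_eq_self_of_nodup _ ((PySem.List.nodup_pyRange_one _ _).filter _)]
  unfold PySem.Set.inter PySem.Set.len
  rw [PySem.List.sum_map_const_int, mul_one]
  congr 1
  have heq :
      ((PySem.List.pyRange 0 (PySem.Str.len a - 1) 1).filter
        (fun i => PySem.Chars.isspace (PySem.List.pyGetD a.toList i ' ')
               ^^ PySem.Chars.isspace (PySem.List.pyGetD a.toList (i + 1) ' '))).filter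
        (fun x => PySem.Set.contains ((PySem.List.pyRange 0 (PySem.Str.len b - 1) 1).filter
          (fun i => PySem.Chars.isspace (PySem.List.pyGetD b.toList i ' ')
                 ^^ PySem.Chars.isspace (PySem.List.pyGetD b.toList (i + 1) ' '))) x)
      = (PySem.List.pyRange 0 (min (PySem.Str.len a) (PySem.Str.len b) - 1) 1).filter
          (fun i => pvEdgeAtB a i && pvEdgeAtB b i) := by
    apply List.Perm.eq_of_pairwise (le := (· < · : Int → Int → Prop))
    · intro x y _ _ h1 h2; omega
    · exact (((PySem.List.pairwise_lt_pyRange_one _ _).sublist List.filter_sublist).sublist List.filter_sublist)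
    · exact ((PySem.List.pairwise_lt_pyRange_one _ _).sublist List.filter_sublist)
    · rw [List.perm_ext_iff_of_nodup
        (((PySem.List.nodup_pyRange_one _ _).filter _).filter _)
        ((PySem.List.nodup_pyRange_one _ _).filter _)]
      intro i
      simp only [List.mem_filter, PySem.List.mem_pyRange_one, PySem.Set.contains_iff,
        pvEdgeAtB, Bool.and_eq_true, bne_iff_ne, ne_eq]
      constructor
      · rintro ⟨⟨⟨h0, ha⟩, pa⟩, ⟨hb0, hb⟩, pb⟩
        exact ⟨⟨h0, by omega⟩, by simpa using pa, by simpa using pb⟩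
      · rintro ⟨⟨h0, hm⟩, pa, pb⟩
        refine ⟨⟨⟨h0, by omega⟩, by simpa using pa⟩, ⟨h0, by omega⟩, by simpa using pb⟩
  rw [heq]

theorem pvScore_go (l : String) (ls : List String) :
    pvPairScore (pvEdges l) ls = pvGo (l :: ls) := by
  induction ls generalizing l with
  | nil => simp [pvPairScore, pvGo]
  | cons l' ls ih => simp only [pvPairScore, pvGo, pvPair, ih]

-- ===== VERDICT (by name: the statement is the Claim_ definition above) =====
theorem tableness_spec : Claim_equal_tableness := by
  intro text _
  unfold Spec_tableness tableness tableness_alt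
  cases h : PySem.Str.splitlines text with
  | nil => simp [pvGo]
  | cons l ls =>
      rw [pvA_loop, zero_add]
      have h0 : PySem.Set.inter (PySem.Set.empty : PySem.Set Int) (pvEdges l) = [] := rfl
      simp only [pvPairScore, h0]
      rw [pvScore_go]
      simp [PySem.Set.len]
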